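-- pv_equiv track=rewrite | github.com/dawoodaijaz97/Leetcode | maximum-total-subarray-value-ii/solution.py | solve
-- ===== SOURCE A (Python) =====
-- from typing import List
--
-- def solve(nums: List[int], k: int) -> int:
--     n = len(nums)
--     max_values = [0] * n
--     min_values = [0] * n
--
--     # Calculate max and min values for subarrays ending at each index
--     stack = []
--     for i in range(n):
--         while stack and nums[stack[-1]] <= nums[i]:
--             stack.pop()
--         if stack:
--             max_values[i] = nums[stack[-1]]
--         else:
--             max_values[i] = nums[i]
--         stack.append(i)
--
--     stack.clear()
--     for i in range(n-1, -1, -1):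
--         while stack and nums[stack[-1]] >= nums[i]:
--             stack.pop()
--         if stack:
--             min_values[i] = nums[stack[-1]]
--         else:
--             min_values[i] = nums[i]
--         stack.append(i)
--
--     # Calculate the maximum total value
--     max_heap = []
--     for i in range(n):
--         for j in range(i, n):
--             subarray_value = max_values[j] - min_values[i]
--             if len(max_heap) < k:
--                 import heapq
--                 heapq.heappush(max_heap, subarray_value)
--             elif subarray_value > max_heap[0]:
--                 heapq.heapreplace(max_heap, subarray_value)
--
--     return sum(max_heap)
-- ===== SOURCE B (Python) =====
-- from typing import List
--
-- def first_greater(x, xs):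
--     for y in xs:
--         if y > x:
--             return y
--     return x
--
-- def first_smaller(x, xs):
--     for y in xs:
--         if y < x:
--             return y
--     return x
--
-- def solve(nums: List[int], k: int) -> int:
--     n = len(nums)
--     max_values = [first_greater(nums[i], nums[:i][::-1]) for i in range(n)]
--     min_values = [first_smaller(nums[i], nums[i + 1:]) for i in range(n)]
--     vals = sorted(max_values[j] - min_values[i] for i in range(n) for j in range(i, n))
--     t = max(0, min(k, len(vals)))
--     return sum(vals[len(vals) - t:])
-- ===== Notes on version B (the rewrite author's own statement) =====
-- stated objective: simpler
-- what changed: B replaces A's two monotonic-stack passes by direct nearest-greater/nearest-smaller scans and replaces A's size-k min-heap maintained over every candidate pair by collecting all pair values, sorting once, and summing the top slice.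
import Mathlib
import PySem

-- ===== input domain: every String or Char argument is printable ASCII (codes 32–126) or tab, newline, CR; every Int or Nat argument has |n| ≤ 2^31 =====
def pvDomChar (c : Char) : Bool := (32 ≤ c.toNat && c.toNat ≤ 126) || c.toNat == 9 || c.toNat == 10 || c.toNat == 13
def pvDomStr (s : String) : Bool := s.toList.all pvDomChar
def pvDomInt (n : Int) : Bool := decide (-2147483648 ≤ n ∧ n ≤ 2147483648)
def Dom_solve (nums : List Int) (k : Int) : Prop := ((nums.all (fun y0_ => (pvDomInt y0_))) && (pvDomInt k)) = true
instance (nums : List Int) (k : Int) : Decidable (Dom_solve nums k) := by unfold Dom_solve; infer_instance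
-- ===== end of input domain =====

-- B replaces A's two monotonic-stack passes by direct nearest-greater/nearest-smaller scans and
-- A's size-k min-heap over every candidate pair by one sort of all pair values; objective: simpler.

-- ===== PORT A =====
-- 'while stack and nums[stack[-1]] <= nums[i]: stack.pop()'; stack is ported head-as-top
-- (python appends/pops at the right end); indices on the stack are always < len nums, so getD 0 is exact.
def popLe (nums : List Int) (x : Int) : List Nat → List Nat
  | [] => []
  | j :: rest => if nums.getD j 0 ≤ x then popLe nums x rest else j :: rest

-- 'while stack and nums[stack[-1]] >= nums[i]: stack.pop()'
def popGe (nums : List Int) (x : Int) : List Nat → List Nat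
  | [] => []
  | j :: rest => if x ≤ nums.getD j 0 then popGe nums x rest else j :: rest

-- 'nums[stack[-1]] if stack else nums[i]'
def topVal (nums : List Int) (x : Int) : List Nat → Int
  | [] => x
  | j :: _ => nums.getD j 0

-- body of the first 'for i in range(n)' loop (state = (stack, max_values))
def maxStep (nums : List Int) (st : List Nat × List Int) (i : Nat) : List Nat × List Int :=
  let x := nums.getD i 0
  let s := popLe nums x st.1
  (i :: s, st.2 ++ [topVal nums x s])

-- body of the 'for i in range(n-1, -1, -1)' loop; i descends, so assigning min_values[i] prepends
def minStep (nums : List Int) (st : List Nat × List Int) (i : Nat) : List Nat × List Int :=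
  let x := nums.getD i 0
  let s := popGe nums x st.1
  (i :: s, topVal nums x s :: st.2)

-- heapq's min-heap modeled as an ascending sorted list: exact for every observation A makes of it
-- (max_heap[0] = its minimum, its length, its sum); heappush = insert, heapreplace = drop min, insert.
def hpush (h : List Int) (x : Int) : List Int := List.orderedInsert (· ≤ ·) x h

def hreplace (h : List Int) (x : Int) : List Int := List.orderedInsert (· ≤ ·) x h.tail

-- inner-loop body: push if len < k, else replace if value > max_heap[0]
-- (max_heap[0] on an empty heap is Python's IndexError, excluded by Pre_solve; headD 0 is unreached there)
def heapStep (k : Int) (h : List Int) (x : Int) : List Int :=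
  if (h.length : Int) < k then hpush h x
  else if h.headD 0 < x then hreplace h x
  else h

def solve (nums : List Int) (k : Int) : Int :=
  let n := nums.length
  let maxV := ((List.range n).foldl (maxStep nums) ([], [])).2
  let minV := ((List.range n).reverse.foldl (minStep nums) ([], [])).2
  let heap := (List.range n).foldl (fun h i =>
      (List.range' i (n - i)).foldl (fun h j =>
        heapStep k h (maxV.getD j 0 - minV.getD i 0)) h) []
  heap.sum

-- ===== PORT B =====
-- first y in xs with y > x, else x
def firstGreater (x : Int) : List Int → Int
  | [] => x
  | y :: ys => if x < y then y else firstGreater x ys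

-- first y in xs with y < x, else x
def firstSmaller (x : Int) : List Int → Int
  | [] => x
  | y :: ys => if y < x then y else firstSmaller x ys

def solve_alt (nums : List Int) (k : Int) : Int :=
  let n := nums.length
  -- nums[:i][::-1] = (nums.take i).reverse ; nums[i+1:] = nums.drop (i+1); i < n so getD 0 is exact
  let maxV := (List.range n).map (fun i => firstGreater (nums.getD i 0) ((nums.take i).reverse))
  let minV := (List.range n).map (fun i => firstSmaller (nums.getD i 0) (nums.drop (i + 1)))
  let vals := PySem.List.sorted
      ((List.range n).flatMap (fun i =>
        (List.range' i (n - i)).map (fun j => maxV.getD j 0 - minV.getD i 0)))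
      (fun x => x) false
  let t := (max 0 (min k (vals.length : Int))).toNat
  (vals.drop (vals.length - t)).sum

-- ===== PRECONDITION & SPEC =====
-- Pre_ excludes exactly the inputs on which A raises: a nonempty nums with k ≤ 0 reaches
-- 'max_heap[0]' on the empty heap (IndexError).
def Pre_solve (nums : List Int) (k : Int) : Prop := nums = [] ∨ 1 ≤ k
instance (nums : List Int) (k : Int) : Decidable (Pre_solve nums k) := by unfold Pre_solve; infer_instance

def pvWitness_solve : List Int × Int := ([3, -1, 4, 1], 3)

def Spec_solve (nums : List Int) (k : Int) (out : Int) : Prop := out = solve_alt nums k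
instance (nums : List Int) (k : Int) (out : Int) : Decidable (Spec_solve nums k out) := by unfold Spec_solve; infer_instance

-- ===== CLAIM (what is proved, stated in full; the proofs are below) =====
def Claim_equal_solve : Prop := ∀ (nums : List Int) (k : Int), Dom_solve nums k → Pre_solve nums k → Spec_solve nums k (solve nums k)

-- ===== LEMMAS AND PROOFS =====

theorem firstGreater_eq_find? (x : Int) (l : List Int) :
    firstGreater x l = (l.find? (fun y => decide (x < y))).getD x := by
  induction l with
  | nil => rfl
  | cons y ys ih =>
    by_cases h : x < y
    · simp [firstGreater, h, List.find?_cons_of_pos]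
    · simp [firstGreater, h, List.find?_cons_of_neg, ih]

theorem find?_and_asymm {α : Type} (R : α → α → Prop) (p q : α → Bool) :
    ∀ (l : List α), l.Pairwise R → (∀ x y, R x y → R y x → False) →
    (∀ j, j ∈ l → p j = true → (∀ a, a ∈ l → R a j → p a = false) → q j = true) →
    l.find? (fun a => q a && p a) = l.find? p := by
  intro l
  induction l with
  | nil => intro _ _ _; rfl
  | cons a t ih =>
    intro hp hasym h
    rcases List.pairwise_cons.mp hp with ⟨hra, hpt⟩
    by_cases hpa : p a = true
    · have hqa : q a = true := by
        apply h a (List.mem_cons_self) hpa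
        intro b hb hR
        rcases List.mem_cons.mp hb with hb | hb
        · rw [hb] at hR; exact (hasym a a hR hR).elim
        · exact (hasym a b (hra b hb) hR).elim
      rw [List.find?_cons_of_pos, List.find?_cons_of_pos] <;> simp [hpa, hqa]
    · have hpa' : p a = false := by simpa using hpa
      rw [List.find?_cons_of_neg, List.find?_cons_of_neg]
      · apply ih hpt hasym
        intro j hj hpj hall
        apply h j (List.mem_cons_of_mem _ hj) hpj
        intro b hb hR
        rcases List.mem_cons.mp hb with hb | hb
        · subst hb; exact hpa'
        · exact hall b hb hR
      · simp [hpa']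
      · simp [hpa']

theorem popLe_eq_filter (nums : List Int) (x : Int) :
    ∀ (s : List Nat), s.Pairwise (fun a b => nums.getD a 0 < nums.getD b 0) →
    popLe nums x s = s.filter (fun j => decide (x < nums.getD j 0)) := by
  intro s
  induction s with
  | nil => intro _; rfl
  | cons j rest ih =>
    intro hp
    rcases List.pairwise_cons.mp hp with ⟨hj, hpt⟩
    by_cases hle : nums.getD j 0 ≤ x
    · have hf : (decide (x < nums.getD j 0)) = false := by
        simp only [decide_eq_false_iff_not]; omega
      rw [popLe, if_pos hle, ih hpt, List.filter_cons]
      simp only [hf, Bool.false_eq_true, if_false]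
    · have ht : (decide (x < nums.getD j 0)) = true := by
        simp only [decide_eq_true_eq]; omega
      have hrest : rest.filter (fun j => decide (x < nums.getD j 0)) = rest := by
        apply List.filter_eq_self.mpr
        intro b hb
        have := hj b hb
        simp only [decide_eq_true_eq]; omega
      rw [popLe, if_neg hle, List.filter_cons]
      simp only [ht, if_true, hrest]

theorem popGe_eq_filter (nums : List Int) (x : Int) :
    ∀ (s : List Nat), s.Pairwise (fun a b => nums.getD b 0 < nums.getD a 0) →
    popGe nums x s = s.filter (fun j => decide (nums.getD j 0 < x)) := by
  intro s
  induction s with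
  | nil => intro _; rfl
  | cons j rest ih =>
    intro hp
    rcases List.pairwise_cons.mp hp with ⟨hj, hpt⟩
    by_cases hle : x ≤ nums.getD j 0
    · have hf : (decide (nums.getD j 0 < x)) = false := by
        simp only [decide_eq_false_iff_not]; omega
      rw [popGe, if_pos hle, ih hpt, List.filter_cons]
      simp only [hf, Bool.false_eq_true, if_false]
    · have ht : (decide (nums.getD j 0 < x)) = true := by
        simp only [decide_eq_true_eq]; omega
      have hrest : rest.filter (fun j => decide (nums.getD j 0 < x)) = rest := by
        apply List.filter_eq_self.mpr
        intro b hb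
        have := hj b hb
        simp only [decide_eq_true_eq]; omega
      rw [popGe, if_neg hle, List.filter_cons]
      simp only [ht, if_true, hrest]

-- j stays on the first stack at time i iff everything after j and before i is strictly below nums[j]
def kMax (nums : List Int) (i j : Nat) : Bool :=
  decide (∀ l, l < i → j < l → nums.getD l 0 < nums.getD j 0)

def stackA (nums : List Int) : Nat → List Nat
  | 0 => []
  | i+1 => i :: popLe nums (nums.getD i 0) (stackA nums i)

theorem maxFold_eq (nums : List Int) (m : Nat) :
    (List.range m).foldl (maxStep nums) ([], []) =
      (stackA nums m, (List.range m).map (fun i =>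
        topVal nums (nums.getD i 0) (popLe nums (nums.getD i 0) (stackA nums i)))) := by
  induction m with
  | zero => rfl
  | succ m ih =>
    rw [List.range_succ, List.foldl_append, ih]
    simp [maxStep, stackA]

theorem pairwise_filter_kMax (nums : List Int) (i : Nat) :
    (((List.range i).reverse).filter (kMax nums i)).Pairwise
      (fun a b => nums.getD a 0 < nums.getD b 0) := by
  have h0 : ((List.range i).reverse).Pairwise (fun a b : Nat => b < a) := by
    rw [List.pairwise_reverse]
    exact List.pairwise_lt_range
  have h1 := h0.filter (kMax nums i)
  apply h1.imp_of_mem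
  intro a b ha hb hR
  have hbk : kMax nums i b = true := (List.mem_filter.mp hb).2
  have hai : a < i := List.mem_range.mp (List.mem_reverse.mp (List.mem_filter.mp ha).1)
  exact (of_decide_eq_true hbk) a hai hR

theorem stackA_eq (nums : List Int) :
    ∀ i, stackA nums i = ((List.range i).reverse).filter (kMax nums i) := by
  intro i
  induction i with
  | zero => rfl
  | succ i ih =>
    have hrev : (List.range (i+1)).reverse = i :: (List.range i).reverse := by
      rw [List.range_succ, List.reverse_append]; rfl
    have hki : kMax nums (i+1) i = true := by
      apply decide_eq_true; intro l hl hil; omega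
    rw [stackA, ih, hrev, List.filter_cons]
    simp only [hki, if_true]
    congr 1
    rw [popLe_eq_filter nums _ _ (pairwise_filter_kMax nums i), List.filter_filter]
    apply List.filter_congr
    intro j hj
    have hji : j < i := List.mem_range.mp (List.mem_reverse.mp hj)
    simp only [kMax, ← Bool.decide_and, decide_eq_decide]
    constructor
    · rintro ⟨h2, h1⟩ l hl hjl
      rcases Nat.lt_succ_iff_lt_or_eq.mp hl with h | h
      · exact h1 l h hjl
      · subst h; omega
    · intro h
      refine ⟨by have := h i (Nat.lt_succ_self i) hji; omega,
        fun l hl hjl => h l (Nat.lt_succ_of_lt hl) hjl⟩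

theorem head?_filter_eq_find? {α : Type} (p : α → Bool) :
    ∀ (l : List α), (l.filter p).head? = l.find? p := by
  intro l
  induction l with
  | nil => rfl
  | cons a t ih =>
    rw [List.filter_cons, List.find?_cons]
    cases h : p a
    · simp [ih]
    · rfl

theorem topVal_eq_head? (nums : List Int) (x : Int) (s : List Nat) :
    topVal nums x s = (s.head?.map (fun j => nums.getD j 0)).getD x := by
  cases s <;> rfl

theorem take_eq_map_range (nums : List Int) (i : Nat) (hi : i ≤ nums.length) :
    nums.take i = (List.range i).map (fun j => nums.getD j 0) := by
  apply List.ext_getElem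
  · simp [Nat.min_eq_left hi]
  · intro m h1 h2
    simp only [List.getElem_take, List.getElem_map, List.getElem_range]
    rw [List.getD_eq_getElem?_getD, List.getElem?_eq_getElem (by simp at h1 ⊢; omega)]
    rfl

theorem maxVal_eq (nums : List Int) (i : Nat) (hi : i < nums.length) :
    topVal nums (nums.getD i 0) (popLe nums (nums.getD i 0) (stackA nums i)) =
      firstGreater (nums.getD i 0) ((nums.take i).reverse) := by
  set x := nums.getD i 0 with hx
  set f : Nat → Int := fun j => nums.getD j 0 with hf
  rw [topVal_eq_head?, stackA_eq,
    popLe_eq_filter nums _ _ (pairwise_filter_kMax nums i), List.filter_filter,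
    head?_filter_eq_find?]
  rw [firstGreater_eq_find?, take_eq_map_range nums i hi.le, ← List.map_reverse,
    List.find?_map]
  have : (List.range i).reverse.find?
      (fun a => kMax nums i a && decide (x < nums.getD a 0)) =
      (List.range i).reverse.find? (fun j => decide (x < nums.getD j 0)) := by
    apply find?_and_asymm (fun a b : Nat => b < a) _ (kMax nums i)
    · rw [List.pairwise_reverse]; exact List.pairwise_lt_range
    · intro a b h1 h2; omega
    · intro j hj hpj hall
      apply decide_eq_true
      intro l hl hjl
      have hlm : l ∈ (List.range i).reverse := by
        rw [List.mem_reverse, List.mem_range]; exact hl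
      have := hall l hlm hjl
      have h1 : ¬ (x < nums.getD l 0) := by
        intro hcon
        rw [decide_eq_true hcon] at this
        exact Bool.true_eq_false ▸ this.symm ▸ rfl
      have h2 : x < nums.getD j 0 := of_decide_eq_true hpj
      omega
  have hcomm : (fun a => decide (x < nums.getD a 0) && kMax nums i a)
      = (fun a => kMax nums i a && decide (x < nums.getD a 0)) :=
    funext fun a => Bool.and_comm _ _
  rw [hcomm, this]
  rfl

theorem firstSmaller_eq_find? (x : Int) (l : List Int) :
    firstSmaller x l = (l.find? (fun y => decide (y < x))).getD x := by
  induction l with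
  | nil => rfl
  | cons y ys ih =>
    by_cases h : y < x
    · simp [firstSmaller, h, List.find?_cons_of_pos]
    · simp [firstSmaller, h, List.find?_cons_of_neg, ih]

-- j stays on the second stack at time i iff everything before j and at/after i is strictly above nums[j]
def kMin (nums : List Int) (i j : Nat) : Bool :=
  decide (∀ l, l < j → i ≤ l → nums.getD j 0 < nums.getD l 0)

def stkM (nums : List Int) (n i : Nat) : List Nat :=
  if h : i < n then i :: popGe nums (nums.getD i 0) (stkM nums n (i+1)) else []
termination_by n - i

theorem minFold_eq (nums : List Int) (n : Nat) :
    ∀ (m : Nat), m ≤ n → ∀ (a : List Int),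
    (List.range m).reverse.foldl (minStep nums) (stkM nums n m, a) =
      (stkM nums n 0, ((List.range m).map (fun i =>
        topVal nums (nums.getD i 0) (popGe nums (nums.getD i 0) (stkM nums n (i+1))))) ++ a) := by
  intro m
  induction m with
  | zero => intro _ a; simp
  | succ m ih =>
    intro hmn a
    have hmn' : m < n := hmn
    have hrev : (List.range (m+1)).reverse = m :: (List.range m).reverse := by
      rw [List.range_succ, List.reverse_append]; rfl
    have hstk : stkM nums n m = m :: popGe nums (nums.getD m 0) (stkM nums n (m+1)) := by
      rw [stkM, dif_pos hmn']
    rw [hrev, List.foldl_cons]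
    have hms : minStep nums (stkM nums n (m+1), a) m =
        (stkM nums n m,
          topVal nums (nums.getD m 0) (popGe nums (nums.getD m 0) (stkM nums n (m+1))) :: a) := by
      rw [minStep, hstk]
    rw [hms, ih (le_of_lt hmn')]
    rw [List.range_succ, List.map_append]
    simp

theorem pairwise_filter_kMin (nums : List Int) (i len : Nat) :
    (((List.range' i len).filter (kMin nums i))).Pairwise
      (fun a b => nums.getD b 0 < nums.getD a 0) := by
  have h1 := (List.pairwise_lt_range' (s := i) (n := len)).filter (kMin nums i)
  apply h1.imp_of_mem
  intro a b ha hb hR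
  have hbk : kMin nums i b = true := (List.mem_filter.mp hb).2
  have hai : i ≤ a := (List.mem_range'_1.mp (List.mem_filter.mp ha).1).1
  exact (of_decide_eq_true hbk) a hR hai

theorem stkM_eq (nums : List Int) (n : Nat) :
    ∀ (d i : Nat), n - i = d → stkM nums n i = (List.range' i (n - i)).filter (kMin nums i) := by
  intro d
  induction d with
  | zero =>
    intro i hd
    rw [stkM, dif_neg (by omega), hd, List.range'_zero, List.filter_nil]
  | succ d ih =>
    intro i hd
    have hin : i < n := by omega
    have hki : kMin nums i i = true := by
      apply decide_eq_true; intro l hl hil; omega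
    rw [stkM, dif_pos hin, hd, List.range'_succ, List.filter_cons]
    simp only [hki, if_true]
    congr 1
    have hd' : n - (i+1) = d := by omega
    rw [ih (i+1) hd', popGe_eq_filter nums _ _ (pairwise_filter_kMin nums (i+1) (n - (i+1))), List.filter_filter]
    rw [hd']
    apply List.filter_congr
    intro j hj
    have hji : i + 1 ≤ j := (List.mem_range'_1.mp hj).1
    simp only [kMin, ← Bool.decide_and, decide_eq_decide]
    constructor
    · rintro ⟨h2, h1⟩ l hl hil
      rcases Nat.lt_or_ge l (i+1) with h | h
      · have : l = i := by omega
        subst this; omega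
      · exact h1 l hl h
    · intro h
      refine ⟨by have := h i (by omega) (le_refl i); omega,
        fun l hl hil => h l hl (by omega)⟩

theorem drop_eq_map_range' (nums : List Int) (m : Nat) :
    nums.drop m = (List.range' m (nums.length - m)).map (fun j => nums.getD j 0) := by
  apply List.ext_getElem
  · simp
  · intro t h1 h2
    simp only [List.getElem_drop, List.getElem_map, List.getElem_range']
    rw [List.getD_eq_getElem?_getD, List.getElem?_eq_getElem (by simp at h1 ⊢; omega)]
    simp

theorem minVal_eq (nums : List Int) (i : Nat) :
    topVal nums (nums.getD i 0) (popGe nums (nums.getD i 0) (stkM nums nums.length (i+1))) =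
      firstSmaller (nums.getD i 0) (nums.drop (i+1)) := by
  set x := nums.getD i 0 with hx
  rw [topVal_eq_head?, stkM_eq nums nums.length (nums.length - (i+1)) (i+1) rfl,
    popGe_eq_filter nums _ _ (pairwise_filter_kMin nums (i+1) _), List.filter_filter,
    head?_filter_eq_find?]
  rw [firstSmaller_eq_find?, drop_eq_map_range' nums (i+1), List.find?_map]
  have key : (List.range' (i+1) (nums.length - (i+1))).find?
      (fun a => kMin nums (i+1) a && decide (nums.getD a 0 < x)) =
      (List.range' (i+1) (nums.length - (i+1))).find? (fun j => decide (nums.getD j 0 < x)) := by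
    apply find?_and_asymm (fun a b : Nat => a < b) _ (kMin nums (i+1))
    · exact List.pairwise_lt_range'
    · intro a b h1 h2; omega
    · intro j hj hpj hall
      apply decide_eq_true
      intro l hl hil
      have hlm : l ∈ List.range' (i+1) (nums.length - (i+1)) := by
        rw [List.mem_range'_1]
        rcases List.mem_range'_1.mp hj with ⟨h1, h2⟩
        omega
      have := hall l hlm hl
      have h1 : ¬ (nums.getD l 0 < x) := by
        intro hcon
        rw [decide_eq_true hcon] at this
        exact absurd this (by simp)
      have h2 : nums.getD j 0 < x := of_decide_eq_true hpj
      omega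
  have hcomm : (fun a => decide (nums.getD a 0 < x) && kMin nums (i+1) a)
      = (fun a => kMin nums (i+1) a && decide (nums.getD a 0 < x)) :=
    funext fun a => Bool.and_comm _ _
  rw [hcomm, key]
  rfl

theorem stkM_len (nums : List Int) (n : Nat) : stkM nums n n = [] := by
  rw [stkM, dif_neg (by omega)]

theorem minA_eq (nums : List Int) :
    ((List.range nums.length).reverse.foldl (minStep nums) ([], [])).2 =
      (List.range nums.length).map (fun i => firstSmaller (nums.getD i 0) (nums.drop (i+1))) := by
  have h0 : (([], []) : List Nat × List Int) = (stkM nums nums.length nums.length, ([] : List Int)) := by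
    rw [stkM_len]
  rw [h0, minFold_eq nums nums.length nums.length (le_refl _) []]
  simp only [List.append_nil]
  apply List.map_congr_left
  intro i _
  exact minVal_eq nums i

def sortL (L : List Int) : List Int := PySem.List.sorted L (fun x => x) false

theorem sortL_pairwise (L : List Int) : (sortL L).Pairwise (· ≤ ·) :=
  PySem.List.sorted_pairwise L (fun x => x)

theorem sortL_perm (L : List Int) : (sortL L).Perm L :=
  PySem.List.sorted_perm L (fun x => x) false

theorem sortL_length (L : List Int) : (sortL L).length = L.length :=
  (sortL_perm L).length_eq

theorem sortSnoc (L : List Int) (x : Int) :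
    sortL (L ++ [x]) = List.orderedInsert (· ≤ ·) x (sortL L) := by
  apply PySem.List.sorted_id_eq_of_perm_of_pairwise
  · exact (List.perm_orderedInsert _ x (sortL L)).trans
      (((sortL_perm L).cons x).trans (List.perm_append_singleton x L).symm)
  · exact List.Pairwise.orderedInsert x (sortL L) (sortL_pairwise L)

theorem oi_drop_lt (x : Int) :
    ∀ (S : List Int) (m : Nat), S.Pairwise (· ≤ ·) → ∀ (hm : m < S.length), S[m] < x →
    (List.orderedInsert (· ≤ ·) x S).drop (m+1) = List.orderedInsert (· ≤ ·) x (S.drop (m+1)) := by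
  intro S
  induction S with
  | nil => intro m _ hm; simp at hm
  | cons s t ih =>
    intro m hp hm hx
    rcases List.pairwise_cons.mp hp with ⟨hs, hpt⟩
    cases m with
    | zero =>
      have h0 : s < x := by simpa using hx
      rw [List.orderedInsert, if_neg (by omega)]
      simp
    | succ m =>
      have hmt : m < t.length := by simpa using hm
      have htm : t[m] < x := by simpa using hx
      have hsm : s ≤ t[m] := hs t[m] (List.getElem_mem hmt)
      rw [List.orderedInsert, if_neg (by omega)]
      have := ih m hpt hmt htm
      simpa using this

theorem oi_drop_le (x : Int) :
    ∀ (S : List Int) (m : Nat), S.Pairwise (· ≤ ·) → ∀ (hm : m < S.length), x ≤ S[m] →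
    (List.orderedInsert (· ≤ ·) x S).drop (m+1) = S.drop m := by
  intro S
  induction S with
  | nil => intro m _ hm; simp at hm
  | cons s t ih =>
    intro m hp hm hx
    rcases List.pairwise_cons.mp hp with ⟨hs, hpt⟩
    cases m with
    | zero =>
      have h0 : x ≤ s := by simpa using hx
      rw [List.orderedInsert, if_pos h0]
      simp
    | succ m =>
      have hmt : m < t.length := by simpa using hm
      have htm : x ≤ t[m] := by simpa using hx
      by_cases hxs : x ≤ s
      · rw [List.orderedInsert, if_pos hxs]
        simp
      · rw [List.orderedInsert, if_neg hxs]
        have := ih m hpt hmt htm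
        simpa using this

theorem heapFold_eq (k : Int) (hk : 1 ≤ k) :
    ∀ (L : List Int), L.foldl (heapStep k) [] =
      (sortL L).drop ((sortL L).length - min k.toNat L.length) := by
  intro L
  induction L using List.reverseRecOn with
  | nil =>
    have h0 : sortL [] = [] := rfl
    simp [h0]
  | append_singleton L x ih =>
    rw [List.foldl_append, List.foldl_cons, List.foldl_nil, ih, sortSnoc]
    set S := sortL L with hS
    have hlen : S.length = L.length := sortL_length L
    set K := k.toNat with hK
    have hK1 : 1 ≤ K := by omega
    have hkK : (K : Int) = k := Int.toNat_of_nonneg (by omega)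
    set t := min K L.length with ht
    have htle : t ≤ S.length := by omega
    have hdlen : (S.drop (S.length - t)).length = t := by
      rw [List.length_drop]; omega
    have hlen' : L.length + 1 = (L ++ [x]).length := by simp
    by_cases hlt : t < K
    · -- heap not yet full: L.length < K, t = L.length, the drop is all of S
      have hLK : L.length < K := by omega
      have htL : t = L.length := by omega
      have hstep : heapStep k (S.drop (S.length - t)) x = hpush (S.drop (S.length - t)) x := by
        rw [heapStep, if_pos (by rw [hdlen]; omega)]
      rw [hstep]
      have hdrop0 : S.drop (S.length - t) = S := by
        rw [show S.length - t = 0 by omega, List.drop_zero]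
      rw [hdrop0]
      have : min K (L ++ [x]).length = L.length + 1 := by simp; omega
      rw [this, List.orderedInsert_length]
      rw [show S.length + 1 - (L.length + 1) = 0 by omega, List.drop_zero]
      rfl
    · -- heap full: t = K ≤ L.length
      have htK : t = K := by omega
      have hKL : K ≤ L.length := by omega
      set m := S.length - K with hm
      have hmlt : m < S.length := by omega
      have hhead : (S.drop (S.length - t)).headD 0 = S[m] := by
        rw [List.headD_eq_head?_getD, List.head?_drop, htK, ← hm,
          List.getElem?_eq_getElem hmlt]
        rfl
      have hfull : ¬ ((S.drop (S.length - t)).length : Int) < k := by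
        rw [hdlen]; omega
      have hmin : min K (L ++ [x]).length = K := by simp; omega
      have hlen2 : (List.orderedInsert (· ≤ ·) x S).length = S.length + 1 :=
        List.orderedInsert_length (· ≤ ·) S x
      by_cases hcmp : S[m] < x
      · have hstep : heapStep k (S.drop (S.length - t)) x = hreplace (S.drop (S.length - t)) x := by
          rw [heapStep, if_neg hfull, if_pos (by rw [hhead]; exact hcmp)]
        rw [hstep, hmin, hlen2]
        rw [show S.length + 1 - K = m + 1 by omega]
        rw [oi_drop_lt x S m (sortL_pairwise L) hmlt hcmp]
        rw [hreplace, htK, ← hm, List.tail_drop]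
      · have hstep : heapStep k (S.drop (S.length - t)) x = S.drop (S.length - t) := by
          rw [heapStep, if_neg hfull, if_neg (by rw [hhead]; exact hcmp)]
        rw [hstep, hmin, hlen2]
        rw [show S.length + 1 - K = m + 1 by omega]
        rw [oi_drop_le x S m (sortL_pairwise L) hmlt (by omega)]
        rw [htK, ← hm]

theorem nested_foldl (g : Nat → Nat → Int) (f : List Int → Int → List Int) :
    ∀ (l : List Nat) (inner : Nat → List Nat) (init : List Int),
    l.foldl (fun h i => (inner i).foldl (fun h j => f h (g i j)) h) init =
      (l.flatMap (fun i => (inner i).map (g i))).foldl f init := by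
  intro l
  induction l with
  | nil => intro inner init; rfl
  | cons a l ih =>
    intro inner init
    rw [List.foldl_cons, List.flatMap_cons, List.foldl_append, ← ih, List.foldl_map]

theorem maxA_eq (nums : List Int) :
    ((List.range nums.length).foldl (maxStep nums) ([], [])).2 =
      (List.range nums.length).map (fun i =>
        firstGreater (nums.getD i 0) ((nums.take i).reverse)) := by
  rw [maxFold_eq]
  apply List.map_congr_left
  intro i hi
  exact maxVal_eq nums i (List.mem_range.mp hi)

theorem solve_eq (nums : List Int) (k : Int) (hpre : Pre_solve nums k) :
    solve nums k = solve_alt nums k := by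
  rcases hpre with h | hk
  · subst h
    simp [solve, solve_alt, show PySem.List.sorted ([] : List Int) (fun x => x) false = [] from rfl]
  · simp only [solve, solve_alt]
    rw [maxA_eq, minA_eq]
    rw [nested_foldl (fun i j =>
        ((List.range nums.length).map (fun i =>
          firstGreater (nums.getD i 0) ((nums.take i).reverse))).getD j 0 -
        ((List.range nums.length).map (fun i =>
          firstSmaller (nums.getD i 0) (nums.drop (i+1)))).getD i 0)
      (heapStep k) (List.range nums.length)
      (fun i => List.range' i (nums.length - i)) []]
    rw [heapFold_eq k hk]
    set L := (List.range nums.length).flatMap (fun i =>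
      (List.range' i (nums.length - i)).map (fun j =>
        ((List.range nums.length).map (fun i =>
          firstGreater (nums.getD i 0) ((nums.take i).reverse))).getD j 0 -
        ((List.range nums.length).map (fun i =>
          firstSmaller (nums.getD i 0) (nums.drop (i+1)))).getD i 0)) with hL
    show ((sortL L).drop ((sortL L).length - min k.toNat L.length)).sum =
      ((sortL L).drop ((sortL L).length -
        (max 0 (min k ((sortL L).length : Int))).toNat)).sum
    congr 2
    have hlen : (sortL L).length = L.length := sortL_length L
    rw [hlen]
    omega

-- ===== VERDICT (by name: the statement is the Claim_ definition above) =====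
theorem solve_spec : Claim_equal_solve := by
  unfold Claim_equal_solve
  intro nums k _ hpre
  unfold Spec_solve
  exact solve_eq nums k hpre
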